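-- pv_equiv track=rewrite | github.com/reverseon/my-foobar-collection | expanding-nebula.py | compute
-- ===== SOURCE A (Python) =====
-- def zo1(a, b):
--   return 1 if ((a == 1 or a ==2) and b == 0) or ((b == 1 or b ==2) and a == 0) else 0
--
-- def compute(a, b, n):
--   res = 0
--   for i in range(n):
--     picker = 0b11 << i
--     c1 = (a & picker) >> i
--     c2 = (b & picker) >> i
--     res += zo1(c1, c2) << i
--   return res
-- ===== SOURCE B (Python) =====
-- def compute(a, b, n):
--     # Branch-free bitwise version: bit i of the result is set iff exactly one of
--     # a's bits i,i+1 is set while b's bits i,i+1 are both clear, or vice versa.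
--     if n <= 0:
--         return 0
--     mask = (1 << n) - 1
--     return (((a ^ (a >> 1)) & ~b & ~(b >> 1)) |
--             ((b ^ (b >> 1)) & ~a & ~(a >> 1))) & mask
-- ===== Notes on version B (the rewrite author's own statement) =====
-- stated objective: faster
-- what changed: Replaces the per-bit loop over n overlapping 2-bit windows with a single closed-form whole-integer bitwise expression ((a^(a>>1)) & ~b & ~(b>>1) | (b^(b>>1)) & ~a & ~(a>>1)) masked to the low n bits.
import Mathlib
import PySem

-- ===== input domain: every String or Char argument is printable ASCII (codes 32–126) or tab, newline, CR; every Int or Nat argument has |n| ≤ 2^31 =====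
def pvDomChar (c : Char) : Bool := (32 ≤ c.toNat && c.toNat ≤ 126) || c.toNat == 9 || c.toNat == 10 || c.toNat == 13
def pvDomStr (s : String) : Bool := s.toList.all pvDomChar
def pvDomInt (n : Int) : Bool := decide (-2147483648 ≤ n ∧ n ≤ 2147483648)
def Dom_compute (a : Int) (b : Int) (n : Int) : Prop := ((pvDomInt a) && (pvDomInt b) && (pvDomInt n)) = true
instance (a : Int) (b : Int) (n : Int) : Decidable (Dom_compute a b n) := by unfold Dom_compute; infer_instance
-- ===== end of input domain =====

-- B replaces A's per-bit loop over 2-bit windows by one closed-form whole-integer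
-- bitwise expression masked to the low n bits (no loop over n).

-- shift helpers fixing Python's semantics: shift amount is a Nat (Python raises on negative)
def pyShl (x : Int) (k : Nat) : Int := x <<< k
def pyShr (x : Int) (k : Nat) : Int := x >>> k

-- ===== PORT A =====
def zo1 (a : Int) (b : Int) : Int :=
  if ((a = 1 ∨ a = 2) ∧ b = 0) ∨ ((b = 1 ∨ b = 2) ∧ a = 0) then 1 else 0

def compute (a : Int) (b : Int) (n : Int) : Int :=
  (PySem.List.pyRange 0 n 1).foldl (fun res i =>
    let picker : Int := pyShl 3 i.toNat
    let c1 : Int := pyShr (PySem.Int.band a picker) i.toNat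
    let c2 : Int := pyShr (PySem.Int.band b picker) i.toNat
    res + pyShl (zo1 c1 c2) i.toNat) 0

-- ===== PORT B =====
def compute_alt (a : Int) (b : Int) (n : Int) : Int :=
  if n ≤ 0 then 0
  else
    PySem.Int.band
      (PySem.Int.bor
        (PySem.Int.band (PySem.Int.band (PySem.Int.bxor a (pyShr a 1)) (Int.not b)) (Int.not (pyShr b 1)))
        (PySem.Int.band (PySem.Int.band (PySem.Int.bxor b (pyShr b 1)) (Int.not a)) (Int.not (pyShr a 1))))
      (pyShl 1 n.toNat - 1)

-- ===== PRECONDITION & SPEC =====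
def Spec_compute (a : Int) (b : Int) (n : Int) (out : Int) : Prop := out = compute_alt a b n
instance (a : Int) (b : Int) (n : Int) (out : Int) : Decidable (Spec_compute a b n out) := by unfold Spec_compute; infer_instance

-- ===== CLAIM (what is proved, stated in full; the proofs are below) =====
def Claim_equal_compute : Prop := ∀ (a : Int) (b : Int) (n : Int), Dom_compute a b n → Spec_compute a b n (compute a b n)

-- ===== LEMMAS AND PROOFS =====

-- Nat bit facts
lemma pv_mod2_bit (z : Nat) : z % 2 = if z.testBit 0 then 1 else 0 := by
  have := Nat.mod_two_eq_one_iff_testBit_zero (x := z)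
  cases h : z.testBit 0 <;> simp [h] at this ⊢ <;> omega

lemma pv_add_eq_or (x : Nat) : ∀ (y : Nat), x &&& y = 0 → x + y = x ||| y := by
  induction x using Nat.strong_induction_on with
  | _ x ih =>
    intro y h
    rcases Nat.eq_zero_or_pos x with hx | hx
    · simp [hx]
    · have h2 : x / 2 &&& y / 2 = 0 := by rw [← Nat.and_div_two, h]
      have ihx := ih (x / 2) (by omega) (y / 2) h2
      have hb : (x &&& y).testBit 0 = false := by rw [h]; exact Nat.zero_testBit 0
      rw [Nat.testBit_and] at hb
      have hod : (x ||| y) / 2 = x / 2 ||| y / 2 := Nat.or_div_two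
      have hxm := pv_mod2_bit x
      have hym := pv_mod2_bit y
      have hom := pv_mod2_bit (x ||| y)
      rw [Nat.testBit_or] at hom
      generalize ho : x ||| y = o at *
      generalize hu : x / 2 ||| y / 2 = u at *
      cases hxb : x.testBit 0 <;> cases hyb : y.testBit 0 <;>
        rw [hxb] at hxm hom <;> rw [hyb] at hym hom <;> rw [hxb, hyb] at hb <;>
        simp at hxm hym hom hb ⊢ <;> omega

lemma pv_ldiff_eq_sub (m k : Nat) : Nat.ldiff m k = m - (m &&& k) := by
  have hdisj : (Nat.ldiff m k) &&& (m &&& k) = 0 := by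
    apply Nat.eq_of_testBit_eq; intro i
    simp [Nat.testBit_ldiff, Nat.testBit_and]
    intros; simp_all
  have hor : (Nat.ldiff m k) ||| (m &&& k) = m := by
    apply Nat.eq_of_testBit_eq; intro i
    simp [Nat.testBit_ldiff, Nat.testBit_or, Nat.testBit_and]
    cases m.testBit i <;> cases k.testBit i <;> rfl
  have := pv_add_eq_or (Nat.ldiff m k) (m &&& k) hdisj
  omega

-- PySem's Python-exact bitwise ops are Mathlib's land/lor/xor/lnot
lemma pv_negSucc_eq (j : Nat) : -(j : Int) - 1 = Int.negSucc j := by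
  rw [Int.negSucc_eq]; ring

lemma pv_band_eq (a b : Int) : PySem.Int.band a b = Int.land a b := by
  cases a with
  | ofNat m =>
    cases b with
    | ofNat k => simp [PySem.Int.band, Int.land]
    | negSucc k => simp [PySem.Int.band, Int.land, pv_ldiff_eq_sub]
  | negSucc m =>
    cases b with
    | ofNat k => simp [PySem.Int.band, Int.land, pv_ldiff_eq_sub]
    | negSucc k => simp [PySem.Int.band, Int.land, pv_negSucc_eq]

lemma pv_bor_eq (a b : Int) : PySem.Int.bor a b = Int.lor a b := by
  cases a with
  | ofNat m =>
    cases b with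
    | ofNat k => simp [PySem.Int.bor, Int.lor]
    | negSucc k => simp [PySem.Int.bor, Int.lor, pv_ldiff_eq_sub, pv_negSucc_eq]
  | negSucc m =>
    cases b with
    | ofNat k => simp [PySem.Int.bor, Int.lor, pv_ldiff_eq_sub, pv_negSucc_eq]
    | negSucc k => simp [PySem.Int.bor, Int.lor, pv_negSucc_eq]

lemma pv_bxor_eq (a b : Int) : PySem.Int.bxor a b = Int.xor a b := by
  cases a with
  | ofNat m =>
    cases b with
    | ofNat k => simp [PySem.Int.bxor, Int.xor]
    | negSucc k => simp [PySem.Int.bxor, Int.xor, pv_negSucc_eq]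
  | negSucc m =>
    cases b with
    | ofNat k => simp [PySem.Int.bxor, Int.xor, pv_negSucc_eq]
    | negSucc k => simp [PySem.Int.bxor, Int.xor]

lemma pv_not_eq (a : Int) : Int.not a = Int.lnot a := by
  cases a <;> rfl

-- testBit toolkit
lemma pv_testBit_ofNat (m : Nat) (i : Nat) : (Int.ofNat m).testBit i = m.testBit i := rfl

lemma pv_testBit_shiftRight (a : Int) (k i : Nat) : (a >>> k).testBit i = a.testBit (k + i) := by
  cases a with
  | ofNat m => show (Int.ofNat (m >>> k)).testBit i = _; simp [Int.testBit, Nat.testBit_shiftRight]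
  | negSucc m => show (Int.negSucc (m >>> k)).testBit i = _; simp [Int.testBit, Nat.testBit_shiftRight]

lemma pv_ext_nonneg (x y : Int) (hx : 0 ≤ x) (hy : 0 ≤ y)
    (h : ∀ i, x.testBit i = y.testBit i) : x = y := by
  cases x with
  | ofNat m =>
    cases y with
    | ofNat k => exact congrArg Int.ofNat (Nat.eq_of_testBit_eq h)
    | negSucc k => exact absurd hy (by simp)
  | negSucc m => exact absurd hx (by simp)

lemma pv_land_ofNat_nonneg (a : Int) (k : Nat) : 0 ≤ Int.land a (Int.ofNat k) := by
  cases a <;> simp [Int.land]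

lemma pv_testBit_land_ofNat (a : Int) (k : Nat) (i : Nat) :
    (Int.land a (Int.ofNat k)).testBit i = (a.testBit i && k.testBit i) := by
  have := Int.testBit_land a (Int.ofNat k) i
  rw [this, pv_testBit_ofNat]

lemma pv_shiftRight_nonneg (x : Int) (hx : 0 ≤ x) (i : Nat) : 0 ≤ x >>> i := by
  cases x with
  | ofNat m =>
    rw [show (Int.ofNat m) >>> i = Int.ofNat (m >>> i) from rfl]
    exact Int.natCast_nonneg _
  | negSucc m => exact absurd hx (by simp)

-- (a & (3 << i)) >> i = (a >> i) & 3
lemma pv_window (a : Int) (i : Nat) :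
    (Int.land a ((3:Int) <<< i)) >>> i = Int.land (a >>> i) 3 := by
  have h3 : ((3:Int) <<< i) = Int.ofNat (3 <<< i) := rfl
  apply pv_ext_nonneg
  · rw [h3]
    cases hl : Int.land a (Int.ofNat (3 <<< i)) with
    | ofNat w => exact pv_shiftRight_nonneg _ (by simp) i
    | negSucc w =>
      exact absurd hl (by
        have := pv_land_ofNat_nonneg a (3 <<< i)
        intro hc; rw [hc] at this; simp at this)
  · exact pv_land_ofNat_nonneg _ 3
  · intro j
    rw [pv_testBit_shiftRight, h3, pv_testBit_land_ofNat,
      show (3:Int) = Int.ofNat 3 from rfl, pv_testBit_land_ofNat, pv_testBit_shiftRight,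
      Nat.testBit_shiftLeft]
    simp

-- the low two bits
lemma pv_small_testBit_high (c j : Nat) (h : c < 4) : (Int.ofNat c).testBit (j+2) = false := by
  rw [pv_testBit_ofNat]
  apply Nat.testBit_lt_two_pow
  have h4 : (4:Nat) ≤ 2^(j+2) := by
    calc (4:Nat) = 2^2 := rfl
    _ ≤ 2^(j+2) := Nat.pow_le_pow_right (by omega) (by omega)
  omega

lemma pv_low2 (x : Int) :
    Int.land x 3 = (if x.testBit 0 then 1 else 0) + (if x.testBit 1 then 2 else 0) := by
  have h3 : ∀ j, Nat.testBit 3 j = decide (j < 2) := by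
    intro j; rw [show (3:Nat) = 2^2 - 1 from rfl, Nat.testBit_two_pow_sub_one]
  apply pv_ext_nonneg
  · exact pv_land_ofNat_nonneg _ 3
  · cases x.testBit 0 <;> cases x.testBit 1 <;> simp
  · intro j
    rw [show (3:Int) = Int.ofNat 3 from rfl, pv_testBit_land_ofNat, h3]
    cases h0 : x.testBit 0 <;> cases h1 : x.testBit 1 <;> norm_num <;>
      match j with
      | 0 => simp [h0, h1] <;> decide
      | 1 => simp [h0, h1] <;> decide
      | (j+2) =>
        rw [show (decide (j+2 ≤ 1)) = false from by simp, Bool.and_false]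
        refine Eq.symm ?_
        first
          | exact pv_small_testBit_high 0 j (by omega)
          | exact pv_small_testBit_high 1 j (by omega)
          | exact pv_small_testBit_high 2 j (by omega)
          | exact pv_small_testBit_high 3 j (by omega)

lemma pv_emod2_testBit (x : Int) : x % 2 = if x.testBit 0 then 1 else 0 := by
  cases x with
  | ofNat n =>
    rw [show (Int.ofNat n) % 2 = Int.ofNat (n % 2) from rfl,
      show (Int.ofNat n).testBit 0 = n.testBit 0 from rfl, pv_mod2_bit]
    cases n.testBit 0 <;> simp
  | negSucc n =>
    have hm := pv_mod2_bit n
    rw [show (Int.negSucc n).testBit 0 = !n.testBit 0 from rfl, Int.negSucc_eq]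
    cases h : n.testBit 0 <;> rw [h] at hm <;> simp at hm ⊢ <;> omega

-- masking with 2^m - 1 is emod
lemma pv_two_pow_cast (m : Nat) : ((2:Int))^m = ((2^m : Nat) : Int) := by push_cast; ring

lemma pv_land_mask (x : Int) (m : Nat) : Int.land x ((2:Int)^m - 1) = x % ((2:Int)^m) := by
  have hp : (1:Nat) ≤ 2^m := Nat.one_le_two_pow
  have h1 : ((2:Int)^m - 1) = Int.ofNat (2^m - 1) := by
    rw [Int.ofNat_eq_natCast, pv_two_pow_cast]; omega
  rw [h1]
  cases x with
  | ofNat k =>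
    show Int.ofNat (k &&& (2^m - 1)) = _
    rw [Nat.and_two_pow_sub_one_eq_mod, pv_two_pow_cast, Int.ofNat_eq_natCast,
      Int.ofNat_eq_natCast, Int.ofNat_mod_ofNat]
  | negSucc k =>
    show Int.ofNat (Nat.ldiff (2^m - 1) k) = _
    rw [pv_ldiff_eq_sub, Nat.and_comm, Nat.and_two_pow_sub_one_eq_mod, Int.ofNat_eq_natCast,
      pv_two_pow_cast]
    have hk : k % 2^m < 2^m := Nat.mod_lt _ (by omega)
    have c1 : ((2^m - 1 - k % 2^m : Nat) : Int) = ((2^m : Nat):Int) - 1 - ((k % 2^m : Nat) : Int) := by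
      omega
    have c2 : ((2^m * (k / 2^m) + k % 2^m : Nat) : Int) = (k:Int) := by rw [Nat.div_add_mod]
    rw [Nat.cast_add, Nat.cast_mul] at c2
    have hdvd : ((2^m : Nat) : Int) ∣ (Int.negSucc k - ((2^m - 1 - k % 2^m : Nat) : Int)) := by
      refine ⟨-(((k / 2^m : Nat) : Int) + 1), ?_⟩
      rw [Int.negSucc_eq, c1]
      linear_combination (1 : Int) * c2
    have h2 : Int.negSucc k % ((2^m : Nat):Int) = ((2^m - 1 - k % 2^m : Nat):Int) % ((2^m : Nat):Int) := by
      rw [Int.emod_eq_emod_iff_emod_sub_eq_zero]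
      exact Int.emod_eq_zero_of_dvd hdvd
    rw [h2, Int.emod_eq_of_lt (by positivity) (by omega)]

-- the closed formula, written with Mathlib's bit operations
def pvF (a b : Int) : Int :=
  Int.lor
    (Int.land (Int.land (Int.xor a (pyShr a 1)) (Int.lnot b)) (Int.lnot (pyShr b 1)))
    (Int.land (Int.land (Int.xor b (pyShr b 1)) (Int.lnot a)) (Int.lnot (pyShr a 1)))

lemma pv_testBit_F (a b : Int) (i : Nat) :
    (pvF a b).testBit i =
      ((xor (a.testBit i) (a.testBit (i+1))) && !b.testBit i && !b.testBit (i+1) ||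
       (xor (b.testBit i) (b.testBit (i+1))) && !a.testBit i && !a.testBit (i+1)) := by
  simp [pvF, pyShr, Int.testBit_lor, Int.testBit_land, Int.testBit_lxor, Int.testBit_lnot,
    pv_testBit_shiftRight, Nat.add_comm 1 i]

-- the loop body produces exactly bit i of the formula
lemma pv_zo1_bit (a b : Int) (i : Nat) :
    zo1 ((Int.land a ((3:Int) <<< i)) >>> i) ((Int.land b ((3:Int) <<< i)) >>> i)
      = if (pvF a b).testBit i then 1 else 0 := by
  rw [pv_window, pv_window, pv_low2, pv_low2, pv_testBit_F,
    pv_testBit_shiftRight, pv_testBit_shiftRight, pv_testBit_shiftRight, pv_testBit_shiftRight,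
    Nat.add_zero]
  cases a.testBit i <;> cases a.testBit (i+1) <;> cases b.testBit i <;> cases b.testBit (i+1) <;>
    norm_num [zo1]

lemma pv_div_pow_testBit (x : Int) (m : Nat) :
    (x / (2:Int)^m) % 2 = if x.testBit m then 1 else 0 := by
  have h : x / (2:Int)^m = x >>> m := by
    rw [Int.shiftRight_eq_div_pow, pv_two_pow_cast]
  rw [h, pv_emod2_testBit, pv_testBit_shiftRight, Nat.add_zero]

lemma pv_emod_step (x : Int) (m : Nat) :
    x % (2:Int)^(m+1) = x % (2:Int)^m + (if x.testBit m then (2:Int)^m else 0) := by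
  have hp : (0:Int) < 2^m := by positivity
  have hx : x = (2:Int)^m * (x / 2^m) + x % 2^m := (Int.ediv_add_emod x (2^m)).symm
  have hq : x / 2^m = 2 * ((x / 2^m) / 2) + (x / 2^m) % 2 := by omega
  have hr0 : 0 ≤ x % 2^m := Int.emod_nonneg x (by omega)
  have hr1 : x % 2^m < 2^m := Int.emod_lt_of_pos x hp
  have hb := pv_div_pow_testBit x m
  have h2 : x = ((2:Int)^m * ((x / 2^m) % 2) + x % 2^m) + ((2:Int)^(m+1)) * ((x / 2^m) / 2) := by
    linear_combination hx + ((2:Int)^m) * hq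
  conv_lhs => rw [h2]
  rw [Int.add_mul_emod_self_left, Int.emod_eq_of_lt]
  · rw [hb]; cases h : x.testBit m <;> simp at hb ⊢ <;> omega
  · rcases (show (x / 2^m) % 2 = 0 ∨ (x / 2^m) % 2 = 1 by omega) with h | h <;> rw [h] <;> nlinarith
  · rw [pow_succ]
    rcases (show (x / 2^m) % 2 = 0 ∨ (x / 2^m) % 2 = 1 by omega) with h | h <;> rw [h] <;> nlinarith

lemma pv_pyRange (n : Int) :
    PySem.List.pyRange 0 n 1 = List.map (fun k : Nat => (k:Int)) (List.range (max n 0).toNat) := by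
  simp [PySem.List.pyRange]
  have h : (if 0 < n then n.toNat else 0) = (max n 0).toNat := by split_ifs <;> omega
  rw [h]

-- the loop, characterised in closed form
lemma pv_loop (a b : Int) (M : Nat) :
    List.foldl (fun res i =>
      let picker : Int := pyShl 3 i.toNat
      let c1 : Int := pyShr (PySem.Int.band a picker) i.toNat
      let c2 : Int := pyShr (PySem.Int.band b picker) i.toNat
      res + pyShl (zo1 c1 c2) i.toNat) 0
      (List.map (fun k : Nat => (k:Int)) (List.range M))
    = pvF a b % (2:Int)^M := by
  induction M with
  | zero => simp
  | succ M ih =>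
    rw [List.range_succ, List.map_append, List.foldl_append, ih]
    simp only [List.map_cons, List.map_nil, List.foldl_cons, List.foldl_nil, Int.toNat_natCast]
    rw [pyShl, pyShr, pyShr, pyShl, pv_band_eq, pv_band_eq, pv_zo1_bit, pv_emod_step]
    cases (pvF a b).testBit M <;> simp [Int.shiftLeft_eq]

-- ===== VERDICT (by name: the statement is the Claim_ definition above) =====
theorem compute_spec : Claim_equal_compute := by
  intro a b n _
  show compute a b n = compute_alt a b n
  unfold compute compute_alt
  rw [pv_pyRange, pv_loop]
  by_cases hn : n ≤ 0
  · rw [if_pos hn, show (max n 0).toNat = 0 by omega]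
    simp
  · rw [if_neg hn, pv_band_eq, pv_bor_eq, pv_band_eq, pv_band_eq, pv_bxor_eq,
      pv_band_eq, pv_band_eq, pv_bxor_eq, pv_not_eq, pv_not_eq, pv_not_eq, pv_not_eq,
      show pyShl 1 n.toNat - 1 = (2:Int)^n.toNat - 1 by rw [pyShl, Int.shiftLeft_eq, one_mul],
      show (max n 0).toNat = n.toNat by omega]
    rw [pv_land_mask]
    rfl
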